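-- pv_equiv track=rewrite | github.com/rednebmas/mem | pipeline/auto_reply.py | _extract_person_thread
-- ===== SOURCE A (Python) =====
-- def _extract_person_thread(texts_output, person):
--     """Extract a single person's thread from grouped texts output."""
--     lines = texts_output.split("\n")
--     collecting = False
--     thread_lines = []
--     for line in lines:
--         if line and not line.startswith(" ") and not line.startswith("#"):
--             if person.lower() in line.lower() and "messages):" in line:
--                 collecting = True
--                 thread_lines.append(line)
--             elif collecting:
--                 break
--         elif collecting:
--             thread_lines.append(line)
--     return "\n".join(thread_lines) if thread_lines else None
-- ===== SOURCE B (Python) =====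
-- def _extract_person_thread(texts_output, person):
--     """Segment-based version: split the lines into segments at non-matching
--     headers, then return the first segment suffix that begins at a matching
--     header.  Correct because A's thread is exactly: from the first matching
--     header up to (excluding) the next non-matching header, and non-matching
--     headers are precisely the segment delimiters."""
--     p = person.lower()
--
--     def is_header(l):
--         return bool(l) and not l.startswith(" ") and not l.startswith("#")
--
--     def is_start(l):
--         return is_header(l) and p in l.lower() and "messages):" in l
--
--     def is_delim(l):
--         return is_header(l) and not (p in l.lower() and "messages):" in l)
--
--     segments = [[]]
--     for l in texts_output.split("\n"):
--         if is_delim(l):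
--             segments.append([])
--         else:
--             segments[-1].append(l)
--
--     for seg in segments:
--         for j, l in enumerate(seg):
--             if is_start(l):
--                 return "\n".join(seg[j:])
--     return None
-- ===== Notes on version B (the rewrite author's own statement) =====
-- stated objective: alternative
-- what changed: Replaces A's single stateful scan with a 'collecting' flag by a segmentation algorithm: partition the lines into segments delimited by non-matching header lines, then return the first segment suffix starting at a matching header.
import Mathlib
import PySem

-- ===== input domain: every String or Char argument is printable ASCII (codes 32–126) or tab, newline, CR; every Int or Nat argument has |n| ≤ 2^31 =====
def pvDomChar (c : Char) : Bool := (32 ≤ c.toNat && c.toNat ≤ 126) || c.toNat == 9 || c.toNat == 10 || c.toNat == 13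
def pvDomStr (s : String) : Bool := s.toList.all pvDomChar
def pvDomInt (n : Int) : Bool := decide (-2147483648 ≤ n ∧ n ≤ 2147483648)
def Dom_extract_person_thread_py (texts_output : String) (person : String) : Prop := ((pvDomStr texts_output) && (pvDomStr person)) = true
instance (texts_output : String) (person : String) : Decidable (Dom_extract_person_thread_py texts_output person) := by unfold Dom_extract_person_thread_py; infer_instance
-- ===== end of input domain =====

-- B replaces A's flag-driven scan by a segmentation algorithm (partition lines at non-matching
-- headers, then search the segments for the first matching header); objective: alternative, same cost.


-- ===== PORT A =====
-- 'line and not line.startswith(" ") and not line.startswith("#")'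
def pvAHeader (l : String) : Bool :=
  (l != "") && !(PySem.Str.startswith l " ") && !(PySem.Str.startswith l "#")

-- 'person.lower() in line.lower() and "messages):" in line'
def pvAMatch (person l : String) : Bool :=
  PySem.Str.isIn (PySem.Str.lower person) (PySem.Str.lower l) && PySem.Str.isIn "messages):" l

-- A's single loop with the 'collecting' flag and accumulated 'thread_lines'; 'break'/early return
-- is modelled by returning the accumulator.
def pvALoop (person : String) : List String → Bool → List String → List String
  | [], _, acc => acc
  | l :: ls, collecting, acc =>
    if pvAHeader l then
      if pvAMatch person l then pvALoop person ls true (acc ++ [l])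
      else if collecting then acc
      else pvALoop person ls collecting acc
    else if collecting then pvALoop person ls true (acc ++ [l])
    else pvALoop person ls collecting acc

def extract_person_thread_py (texts_output : String) (person : String) : Option String :=
  let lines := (PySem.Str.split? texts_output "\n").getD []   -- sep "\n" is non-empty: split? never raises
  let thread := pvALoop person lines false []
  if thread.isEmpty then none else some (PySem.Str.join "\n" thread)

-- ===== PORT B =====
-- Source B's is_header / is_start / is_delim (p = person.lower(), precomputed)
def pvBHeader (l : String) : Bool :=
  (l != "") && !(PySem.Str.startswith l " ") && !(PySem.Str.startswith l "#")

def pvBStart (p l : String) : Bool :=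
  pvBHeader l && (PySem.Str.isIn p (PySem.Str.lower l) && PySem.Str.isIn "messages):" l)

def pvBDelim (p l : String) : Bool :=
  pvBHeader l && !(PySem.Str.isIn p (PySem.Str.lower l) && PySem.Str.isIn "messages):" l)

-- the segmentation loop: 'segments.append([])' on a delimiter, else append to the last segment
-- (current segment and the done-list kept reversed, restored at the end)
def pvBSegLoop (p : String) : List String → List String → List (List String) → List (List String)
  | [], cur, done => (cur.reverse :: done).reverse
  | l :: ls, cur, done =>
    if pvBDelim p l then pvBSegLoop p ls [] (cur.reverse :: done)
    else pvBSegLoop p ls (l :: cur) done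

-- 'for j, l in enumerate(seg): if is_start(l): return seg[j:]'
def pvBSearchSeg (p : String) : List String → Option (List String)
  | [] => none
  | l :: ls => if pvBStart p l then some (l :: ls) else pvBSearchSeg p ls

-- 'for seg in segments: …'
def pvBSearch (p : String) : List (List String) → Option (List String)
  | [] => none
  | s :: ss =>
    match pvBSearchSeg p s with
    | some r => some r
    | none => pvBSearch p ss

def extract_person_thread_py_alt (texts_output : String) (person : String) : Option String :=
  let p := PySem.Str.lower person
  let lines := (PySem.Str.split? texts_output "\n").getD []
  match pvBSearch p (pvBSegLoop p lines [] []) with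
  | none => none
  | some t => some (PySem.Str.join "\n" t)

-- ===== PRECONDITION & SPEC =====
def Spec_extract_person_thread_py (texts_output : String) (person : String) (out : Option String) : Prop := out = extract_person_thread_py_alt texts_output person
instance (texts_output : String) (person : String) (out : Option String) : Decidable (Spec_extract_person_thread_py texts_output person out) := by unfold Spec_extract_person_thread_py; infer_instance

-- ===== CLAIM (what is proved, stated in full; the proofs are below) =====
def Claim_equal_extract_person_thread_py : Prop := ∀ (texts_output : String) (person : String), Dom_extract_person_thread_py texts_output person → Spec_extract_person_thread_py texts_output person (extract_person_thread_py texts_output person)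

-- ===== LEMMAS AND PROOFS =====
-- proof-side characterisation: first matching header and its tail …
def pvF (person : String) : List String → Option (String × List String)
  | [] => none
  | l :: ls => if pvAHeader l && pvAMatch person l then some (l, ls) else pvF person ls

-- … and collection up to the first non-matching header
def pvC (person : String) : List String → List String
  | [] => []
  | l :: ls => if pvAHeader l && !pvAMatch person l then [] else l :: pvC person ls

-- proof-side accumulator-free segmentation
def pvSegsF (p : String) : List String → List String → List (List String)
  | [], cur => [cur.reverse]
  | l :: ls, cur => if pvBDelim p l then cur.reverse :: pvSegsF p ls [] else pvSegsF p ls (l :: cur)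

theorem pvBStart_eq (person l : String) :
    pvBStart (PySem.Str.lower person) l = (pvAHeader l && pvAMatch person l) := rfl

theorem pvBDelim_eq (person l : String) :
    pvBDelim (PySem.Str.lower person) l = (pvAHeader l && !pvAMatch person l) := rfl

theorem pvALoop_true (person : String) (ls : List String) (acc : List String) :
    pvALoop person ls true acc = acc ++ pvC person ls := by
  induction ls generalizing acc with
  | nil => simp [pvALoop, pvC]
  | cons l ls ih =>
    by_cases hh : pvAHeader l
    · by_cases hm : pvAMatch person l
      · simp [pvALoop, pvC, hh, hm, ih]
      · simp [pvALoop, pvC, hh, hm]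
    · simp [pvALoop, pvC, hh, ih]

theorem pvALoop_false (person : String) (ls : List String) :
    pvALoop person ls false [] =
      match pvF person ls with
      | none => []
      | some (h, rest) => h :: pvC person rest := by
  induction ls with
  | nil => simp [pvALoop, pvF]
  | cons l ls ih =>
    by_cases hh : pvAHeader l
    · by_cases hm : pvAMatch person l
      · simp [pvALoop, pvF, hh, hm, pvALoop_true]
      · simp [pvALoop, pvF, hh, hm, ih]
    · simp [pvALoop, pvF, hh, ih]

theorem pvBSegLoop_eq (p : String) (ls cur : List String) (done : List (List String)) :
    pvBSegLoop p ls cur done = done.reverse ++ pvSegsF p ls cur := by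
  induction ls generalizing cur done with
  | nil => simp [pvBSegLoop, pvSegsF]
  | cons l ls ih =>
    by_cases hd : pvBDelim p l
    · simp [pvBSegLoop, pvSegsF, hd, ih]
    · simp [pvBSegLoop, pvSegsF, hd, ih]

theorem pvBSearchSeg_append (p : String) (xs ys : List String) :
    pvBSearchSeg p (xs ++ ys) =
      match pvBSearchSeg p xs with
      | some r => some (r ++ ys)
      | none => pvBSearchSeg p ys := by
  induction xs with
  | nil => simp [pvBSearchSeg]
  | cons x xs ih =>
    by_cases hs : pvBStart p x
    · simp [pvBSearchSeg, hs]
    · simp [pvBSearchSeg, hs, ih]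

theorem pvBSearch_segsF (person : String) (ls cur : List String) :
    pvBSearch (PySem.Str.lower person) (pvSegsF (PySem.Str.lower person) ls cur) =
      match pvBSearchSeg (PySem.Str.lower person) cur.reverse with
      | some r => some (r ++ pvC person ls)
      | none =>
        match pvF person ls with
        | none => none
        | some (h, rest) => some (h :: pvC person rest) := by
  induction ls generalizing cur with
  | nil =>
    simp only [pvSegsF, pvBSearch, pvF, pvC]
    cases pvBSearchSeg (PySem.Str.lower person) cur.reverse <;> simp
  | cons l ls ih =>
    by_cases hh : pvAHeader l
    · by_cases hm : pvAMatch person l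
      · -- not a delimiter, is a start
        have hd : pvBDelim (PySem.Str.lower person) l = false := by
          rw [pvBDelim_eq]; simp [hh, hm]
        have hs : pvBStart (PySem.Str.lower person) l = true := by
          rw [pvBStart_eq]; simp [hh, hm]
        have hseg : pvSegsF (PySem.Str.lower person) (l :: ls) cur
            = pvSegsF (PySem.Str.lower person) ls (l :: cur) := by
          simp [pvSegsF, hd]
        rw [hseg, ih, List.reverse_cons, pvBSearchSeg_append]
        cases hcc : pvBSearchSeg (PySem.Str.lower person) cur.reverse with
        | some r => simp [pvC, hh, hm]
        | none => simp [pvBSearchSeg, hs, pvF, hh, hm]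
      · -- a delimiter
        have hd : pvBDelim (PySem.Str.lower person) l = true := by
          rw [pvBDelim_eq]; simp [hh, hm]
        have hseg : pvSegsF (PySem.Str.lower person) (l :: ls) cur
            = cur.reverse :: pvSegsF (PySem.Str.lower person) ls [] := by
          simp [pvSegsF, hd]
        rw [hseg]
        show (match pvBSearchSeg (PySem.Str.lower person) cur.reverse with
              | some r => some r
              | none => pvBSearch (PySem.Str.lower person)
                  (pvSegsF (PySem.Str.lower person) ls [])) = _
        rw [ih]
        cases hcc : pvBSearchSeg (PySem.Str.lower person) cur.reverse with
        | some r => simp [pvC, hh, hm]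
        | none => simp [pvBSearchSeg, pvF, hh, hm]
    · -- not a header: not a delimiter, not a start
      have hd : pvBDelim (PySem.Str.lower person) l = false := by
        rw [pvBDelim_eq]; simp [hh]
      have hs : pvBStart (PySem.Str.lower person) l = false := by
        rw [pvBStart_eq]; simp [hh]
      have hseg : pvSegsF (PySem.Str.lower person) (l :: ls) cur
          = pvSegsF (PySem.Str.lower person) ls (l :: cur) := by
        simp [pvSegsF, hd]
      rw [hseg, ih, List.reverse_cons, pvBSearchSeg_append]
      cases hcc : pvBSearchSeg (PySem.Str.lower person) cur.reverse with
      | some r => simp [pvC, hh]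
      | none => simp [pvBSearchSeg, hs, pvF, hh]

-- ===== VERDICT (by name: the statement is the Claim_ definition above) =====
theorem extract_person_thread_py_spec : Claim_equal_extract_person_thread_py := by
  intro texts_output person _
  unfold Spec_extract_person_thread_py extract_person_thread_py extract_person_thread_py_alt
  dsimp only
  rw [pvALoop_false, pvBSegLoop_eq, List.reverse_nil, List.nil_append, pvBSearch_segsF]
  simp only [List.reverse_nil, pvBSearchSeg]
  cases h : pvF person ((PySem.Str.split? texts_output "\n").getD []) with
  | none => simp
  | some p => cases p with | mk hd rest => simp
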